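-- pv_equiv track=rewrite | github.com/Siddharth8800/NQueens-AI | nqueen.py | threat_score
-- ===== SOURCE A (Python) =====
-- def threat_score(board, row, col):
--     score = 0
--     n = len(board)
--     # checking col above
--     for i in range(row - 1, -1, -1): #we start with row - 1 so we dont count the current queen
--         if board[i][col] == 1:
--             score += 1
--             break
--
--     # checking col below
--     for i in range(row + 1, n): # here we're moving up so we do row + 1
--         if board[i][col] == 1:
--             score += 1
--             break
--
--     # checking positive diagonal moving up
--     for i, j in zip(range(row - 1, -1, -1), range(col + 1, n, 1)):
--         if board[i][j] == 1:
--             score += 1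
--             break
--
--     # checking positive diagonal moving down
--     for i, j in zip(range(row + 1, n, 1), range(col - 1, -1, -1)):
--         if board[i][j] == 1:
--             score += 1
--             break
--
--     # checking negative diagonal moving up
--     for i, j in zip(range(row - 1, -1, -1), range(col - 1, -1, -1)):
--         if board[i][j] == 1:
--             score += 1
--             break
--
--     # checking negative diagonal moving down
--     for i, j in zip(range(row + 1, n, 1), range(col + 1, n, 1)):
--         if board[i][j] == 1:
--             score += 1
--             break
--
--     return score
-- ===== SOURCE B (Python) =====
-- def threat_score(board, row, col):
--     n = len(board)
--     seen = set()
--     for i in range(n):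
--         if i == row:
--             continue
--         r = board[i]
--         d = row - i if i < row else i - row
--         if r[col] == 1:
--             seen.add('N' if i < row else 'S')
--         if col + d < n and r[col + d] == 1:
--             seen.add('NE' if i < row else 'SE')
--         if col - d >= 0 and r[col - d] == 1:
--             seen.add('NW' if i < row else 'SW')
--     return len(seen)
-- ===== Notes on version B (the rewrite author's own statement) =====
-- stated objective: alternative
-- what changed: Instead of A's six outward directional scans with early break, B makes a single row-major pass: for each row i it computes the at-most-three columns of that row lying on the guarded lines through (row, col) (the column itself and the two diagonals at distance |row-i|), tests exactly those cells, collects the directions hit in a set and returns its size; …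
-- outside the precondition, e.g. on threat_score([[0, 0], [0, 1]], -3, -1): A returns 2, B returns 1; on threat_score([[0], [0, 0, 1]], -2, 2): A returns 1, B raises IndexError
import Mathlib
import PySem

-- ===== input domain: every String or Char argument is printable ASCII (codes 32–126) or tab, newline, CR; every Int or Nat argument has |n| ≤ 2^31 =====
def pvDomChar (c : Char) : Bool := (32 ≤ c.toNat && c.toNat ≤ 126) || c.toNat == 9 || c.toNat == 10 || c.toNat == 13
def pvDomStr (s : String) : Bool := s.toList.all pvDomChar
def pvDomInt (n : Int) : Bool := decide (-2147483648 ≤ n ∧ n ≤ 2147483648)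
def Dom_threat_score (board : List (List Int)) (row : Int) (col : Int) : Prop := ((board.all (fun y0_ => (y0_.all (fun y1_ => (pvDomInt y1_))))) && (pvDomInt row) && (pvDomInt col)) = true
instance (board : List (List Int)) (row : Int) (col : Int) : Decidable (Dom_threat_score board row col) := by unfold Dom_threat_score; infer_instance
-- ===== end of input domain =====

-- B replaces A's six outward ray scans by a single row-major pass: for each row i it computes
-- the at-most-three columns of that row that lie on the guarded lines through (row, col)
-- (the column itself and the two diagonals, at distance |row-i|), tests just those cells, and
-- returns the number of distinct directions hit (objective: alternative); equal values on the
-- domain stated by Pre_ below.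

-- ===== PORT A =====
-- board[i][j] with Python index semantics (negative wrap); inside Pre_ every read the programs
-- perform is valid, so the `.getD 0` default (Python's IndexError) is never the decisive value.
def pvCell (board : List (List Int)) (i j : Int) : Int :=
  ((PySem.List.pyGet? board i).bind (fun r => PySem.List.pyGet? r j)).getD 0

-- each Python 'for …: if board[..] == 1: score += 1; break' loop contributes 1 iff some visited
-- cell is 1, i.e. `.any` over the (zipped) range it iterates
def threat_score (board : List (List Int)) (row : Int) (col : Int) : Int :=
  let n : Int := board.length
  let s1 : Int := if (PySem.List.pyRange (row - 1) (-1) (-1)).any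
      (fun i => pvCell board i col == 1) then 1 else 0
  let s2 : Int := if (PySem.List.pyRange (row + 1) n 1).any
      (fun i => pvCell board i col == 1) then 1 else 0
  let s3 : Int := if ((PySem.List.pyRange (row - 1) (-1) (-1)).zip (PySem.List.pyRange (col + 1) n 1)).any
      (fun p => pvCell board p.1 p.2 == 1) then 1 else 0
  let s4 : Int := if ((PySem.List.pyRange (row + 1) n 1).zip (PySem.List.pyRange (col - 1) (-1) (-1))).any
      (fun p => pvCell board p.1 p.2 == 1) then 1 else 0
  let s5 : Int := if ((PySem.List.pyRange (row - 1) (-1) (-1)).zip (PySem.List.pyRange (col - 1) (-1) (-1))).any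
      (fun p => pvCell board p.1 p.2 == 1) then 1 else 0
  let s6 : Int := if ((PySem.List.pyRange (row + 1) n 1).zip (PySem.List.pyRange (col + 1) n 1)).any
      (fun p => pvCell board p.1 p.2 == 1) then 1 else 0
  s1 + s2 + s3 + s4 + s5 + s6

-- ===== PORT B =====
-- body of Source B's loop for one row r = board[i]: test the column cell and the two diagonal
-- cells at distance d, recording the direction of each queen found
def pvScanRow (row col n : Int) (r : List Int) (acc : PySem.Set String) (i : Int) : PySem.Set String :=
  let d : Int := if i < row then row - i else i - row
  let acc1 := if (PySem.List.pyGet? r col).getD 0 = 1 then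
    PySem.Set.add acc (if i < row then "N" else "S") else acc
  let acc2 := if col + d < n ∧ (PySem.List.pyGet? r (col + d)).getD 0 = 1 then
    PySem.Set.add acc1 (if i < row then "NE" else "SE") else acc1
  if 0 ≤ col - d ∧ (PySem.List.pyGet? r (col - d)).getD 0 = 1 then
    PySem.Set.add acc2 (if i < row then "NW" else "SW") else acc2

def threat_score_alt (board : List (List Int)) (row : Int) (col : Int) : Int :=
  let n : Int := board.length
  let seen : PySem.Set String := (PySem.List.pyRange 0 n 1).foldl
    (fun acc i => if i = row then acc
      else pvScanRow row col n ((PySem.List.pyGet? board i).getD []) acc i) PySem.Set.empty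
  (seen.length : Int)

-- ===== PRECONDITION & SPEC =====
-- helper for Pre_: in row i (i ≠ row) every cell the programs test exists — the column cell
-- (possibly through Python's negative-index convention) and the ascending-diagonal cell
-- col+|row-i| whenever the scans reach it (the descending-diagonal cell col-|row-i| is then
-- automatically in range)
def pvRowOk (board : List (List Int)) (row col : Int) (i : Nat) : Prop :=
  -(((board.getD i []).length : Nat) : Int) ≤ col ∧
  col < (((board.getD i []).length : Nat) : Int) ∧
  (col + (((row - (i : Int)).natAbs : Nat) : Int) < (board.length : Int) →
    col + (((row - (i : Int)).natAbs : Nat) : Int) < (((board.getD i []).length : Nat) : Int))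

-- Pre_ restricts to the natural domain: -1 ≤ row ≤ n and every tested cell exists (so neither
-- program hits an IndexError), plus the trivially safe family of queen-free boards whose rows
-- are long enough that no read raises. Outside it one of the programs raises IndexError on a
-- short row or a far out-of-range index, except in the corner where row lies outside [-1, n]
-- and A scans rows selected through Python's negative indexing from the opposite edge — a reading outside the
-- board geometry that no caller of a queen scorer would specify — while B scores the geometric
-- board.
def Pre_threat_score (board : List (List Int)) (row : Int) (col : Int) : Prop :=
  (-1 ≤ row ∧ row ≤ (board.length : Int) ∧
    ∀ i ∈ List.range board.length, (i : Int) ≠ row → pvRowOk board row col i) ∨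
  ((∀ r ∈ board, (board.length : Int) ≤ (r.length : Int) ∧ (1 : Int) ∉ r) ∧
    -(board.length : Int) - 1 ≤ row ∧ row ≤ (board.length : Int) ∧
    -(board.length : Int) ≤ col ∧ col < (board.length : Int))
instance (board : List (List Int)) (row : Int) (col : Int) : Decidable (Pre_threat_score board row col) := by
  unfold Pre_threat_score pvRowOk; infer_instance

def pvWitness_threat_score : List (List Int) × Int × Int := ([[0, 1], [1, 0]], 0, 1)

def Spec_threat_score (board : List (List Int)) (row : Int) (col : Int) (out : Int) : Prop := out = threat_score_alt board row col
instance (board : List (List Int)) (row : Int) (col : Int) (out : Int) : Decidable (Spec_threat_score board row col out) := by unfold Spec_threat_score; infer_instance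

-- ===== CLAIM (what is proved, stated in full; the proofs are below) =====
def Claim_equal_threat_score : Prop := ∀ (board : List (List Int)) (row : Int) (col : Int), Dom_threat_score board row col → Pre_threat_score board row col → Spec_threat_score board row col (threat_score board row col)

-- ===== LEMMAS AND PROOFS =====

-- the condition under which Source B's pass over row i records direction string x
def pvEmits (board : List (List Int)) (row col n i : Int) (x : String) : Prop :=
  (pvCell board i col = 1 ∧ x = (if i < row then "N" else "S")) ∨
  (col + (if i < row then row - i else i - row) < n ∧
    pvCell board i (col + (if i < row then row - i else i - row)) = 1 ∧
    x = (if i < row then "NE" else "SE")) ∨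
  (0 ≤ col - (if i < row then row - i else i - row) ∧
    pvCell board i (col - (if i < row then row - i else i - row)) = 1 ∧
    x = (if i < row then "NW" else "SW"))

-- the row read in Source B equals the two-step Python cell read
lemma read_eq (board : List (List Int)) (i j : Int) :
    (PySem.List.pyGet? ((PySem.List.pyGet? board i).getD []) j).getD 0 = pvCell board i j := by
  unfold pvCell
  cases h : PySem.List.pyGet? board i with
  | none => simp [PySem.List.pyGet?]
  | some r => simp

lemma mem_pvScanRow (board : List (List Int)) (row col n i : Int) (acc : PySem.Set String) (x : String) :
    x ∈ pvScanRow row col n ((PySem.List.pyGet? board i).getD []) acc i ↔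
      x ∈ acc ∨ pvEmits board row col n i x := by
  unfold pvScanRow pvEmits
  simp only [read_eq]
  split_ifs <;> simp_all [PySem.Set.mem_add] <;> tauto

lemma nodup_ite_add (c : Prop) [Decidable c] (s : PySem.Set String) (y : String)
    (h : s.Nodup) : (if c then PySem.Set.add s y else s).Nodup := by
  split_ifs
  · exact PySem.Set.nodup_add s y h
  · exact h

lemma nodup_pvScanRow (row col n : Int) (r : List Int) (acc : PySem.Set String) (i : Int)
    (h : acc.Nodup) : (pvScanRow row col n r acc i).Nodup := by
  unfold pvScanRow
  exact nodup_ite_add _ _ _ (nodup_ite_add _ _ _ (nodup_ite_add _ _ _ h))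

lemma mem_foldB (board : List (List Int)) (row col n : Int) (l : List Int) (acc : PySem.Set String) (x : String) :
    x ∈ l.foldl (fun acc i => if i = row then acc
        else pvScanRow row col n ((PySem.List.pyGet? board i).getD []) acc i) acc ↔
      x ∈ acc ∨ ∃ i ∈ l, i ≠ row ∧ pvEmits board row col n i x := by
  induction l generalizing acc with
  | nil => simp
  | cons hd tl ih =>
    rw [List.foldl_cons, ih]
    by_cases hhd : hd = row
    · simp [hhd]
    · rw [if_neg hhd, mem_pvScanRow]; simp [hhd]; tauto

lemma mem_seenB (board : List (List Int)) (row col : Int) (x : String) :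
    x ∈ (PySem.List.pyRange 0 (board.length : Int) 1).foldl
        (fun acc i => if i = row then acc
          else pvScanRow row col (board.length : Int) ((PySem.List.pyGet? board i).getD []) acc i)
        PySem.Set.empty ↔
      ∃ i ∈ PySem.List.pyRange 0 (board.length : Int) 1, i ≠ row ∧
        pvEmits board row col (board.length : Int) i x := by
  rw [mem_foldB]
  simp [PySem.Set.empty]

lemma nodup_seenB (board : List (List Int)) (row col : Int) :
    ((PySem.List.pyRange 0 (board.length : Int) 1).foldl
        (fun acc i => if i = row then acc
          else pvScanRow row col (board.length : Int) ((PySem.List.pyGet? board i).getD []) acc i)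
        PySem.Set.empty).Nodup := by
  have : ∀ (l : List Int) (acc : PySem.Set String), acc.Nodup →
      (l.foldl (fun acc i => if i = row then acc
        else pvScanRow row col (board.length : Int) ((PySem.List.pyGet? board i).getD []) acc i) acc).Nodup := by
    intro l
    induction l with
    | nil => intro acc h; exact h
    | cons hd tl ih =>
      intro acc h
      refine ih _ ?_
      dsimp only
      split_ifs
      · exact h
      · exact nodup_pvScanRow _ _ _ _ _ _ h
  exact this _ _ (by simp [PySem.Set.empty])

-- which label each branch of pvEmits yields
lemma emits_N (board : List (List Int)) (row col n i : Int) :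
    pvEmits board row col n i "N" ↔ i < row ∧ pvCell board i col = 1 := by
  unfold pvEmits; by_cases hlt : i < row <;> simp [hlt]
lemma emits_S (board : List (List Int)) (row col n i : Int) :
    pvEmits board row col n i "S" ↔ ¬i < row ∧ pvCell board i col = 1 := by
  unfold pvEmits; by_cases hlt : i < row <;> simp [hlt]
lemma emits_NE (board : List (List Int)) (row col n i : Int) :
    pvEmits board row col n i "NE" ↔ i < row ∧ col + (row - i) < n ∧ pvCell board i (col + (row - i)) = 1 := by
  unfold pvEmits; by_cases hlt : i < row <;> simp [hlt]
lemma emits_SE (board : List (List Int)) (row col n i : Int) :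
    pvEmits board row col n i "SE" ↔ ¬i < row ∧ col + (i - row) < n ∧ pvCell board i (col + (i - row)) = 1 := by
  unfold pvEmits; by_cases hlt : i < row <;> simp [hlt]
lemma emits_NW (board : List (List Int)) (row col n i : Int) :
    pvEmits board row col n i "NW" ↔ i < row ∧ 0 ≤ col - (row - i) ∧ pvCell board i (col - (row - i)) = 1 := by
  unfold pvEmits; by_cases hlt : i < row <;> simp [hlt]
lemma emits_SW (board : List (List Int)) (row col n i : Int) :
    pvEmits board row col n i "SW" ↔ ¬i < row ∧ 0 ≤ col - (i - row) ∧ pvCell board i (col - (i - row)) = 1 := by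
  unfold pvEmits; by_cases hlt : i < row <;> simp [hlt]

lemma emits_cases (board : List (List Int)) (row col n i : Int) (x : String)
    (h : pvEmits board row col n i x) :
    x = "N" ∨ x = "S" ∨ x = "NE" ∨ x = "SW" ∨ x = "NW" ∨ x = "SE" := by
  unfold pvEmits at h
  rcases h with ⟨-, h⟩ | ⟨-, -, h⟩ | ⟨-, -, h⟩ <;> split_ifs at h <;> tauto

-- if no row of the board contains a queen, every Python cell read is ≠ 1
lemma pvCell_ne_one (board : List (List Int)) (h : ∀ r ∈ board, (1 : Int) ∉ r) (i j : Int) :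
    pvCell board i j ≠ 1 := by
  unfold pvCell
  cases h1 : PySem.List.pyGet? board i with
  | none => simp
  | some r =>
    cases h2 : PySem.List.pyGet? r j with
    | none => simp [h2]
    | some v =>
      simp only [h2, Option.bind_some, Option.getD_some]
      intro hveq
      exact h r (PySem.List.mem_of_pyGet?_eq_some _ h1)
        (hveq ▸ PySem.List.mem_of_pyGet?_eq_some _ h2)

-- membership in the zip of a descending and an ascending range
lemma mem_zip_da (n : Int) : ∀ (m : Nat) (a b : Int), a < (m : Int) → ∀ p : Int × Int,
    (p ∈ (PySem.List.pyRange a (-1) (-1)).zip (PySem.List.pyRange b n 1) ↔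
      ∃ i : Int, 0 ≤ i ∧ i ≤ a ∧ b + a - i < n ∧ p = (i, b + a - i)) := by
  intro m
  induction m with
  | zero =>
    intro a b ha p
    rw [PySem.List.pyRange_neg_one_eq_nil (by omega : a ≤ (-1 : Int))]
    simp; intro i h1 h2; omega
  | succ m ih =>
    intro a b ha p
    by_cases h : 0 ≤ a ∧ b < n
    · rw [PySem.List.pyRange_neg_one_cons (by omega : (-1 : Int) < a),
        PySem.List.pyRange_one_cons (by omega : b < n), List.zip_cons_cons, List.mem_cons,
        ih (a - 1) (b + 1) (by omega) p]
      constructor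
      · rintro (rfl | ⟨i, h1, h2, h3, rfl⟩)
        · exact ⟨a, by omega, by omega, by omega, by rw [show b + a - a = b by omega]⟩
        · exact ⟨i, by omega, by omega, by omega, by rw [show b + a - i = b + 1 + (a - 1) - i by omega]⟩
      · rintro ⟨i, h1, h2, h3, rfl⟩
        by_cases hi : i = a
        · left; rw [hi, show b + a - a = b by omega]
        · right; exact ⟨i, by omega, by omega, by omega, by rw [show b + 1 + (a - 1) - i = b + a - i by omega]⟩
    · rcases (by omega : a < 0 ∨ n ≤ b) with h' | h'
      · rw [PySem.List.pyRange_neg_one_eq_nil (by omega : a ≤ (-1 : Int))]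
        simp; intro i h1 h2; omega
      · rw [PySem.List.pyRange_one_eq_nil (by omega : n ≤ b), List.zip_nil_right]
        simp; intro i h1 h2 h3; omega

-- membership in the zip of an ascending and a descending range
lemma mem_zip_ad (n : Int) : ∀ (m : Nat) (a b : Int), b < (m : Int) → ∀ p : Int × Int,
    (p ∈ (PySem.List.pyRange a n 1).zip (PySem.List.pyRange b (-1) (-1)) ↔
      ∃ i : Int, a ≤ i ∧ i < n ∧ 0 ≤ a + b - i ∧ p = (i, a + b - i)) := by
  intro m
  induction m with
  | zero =>
    intro a b hb p
    rw [PySem.List.pyRange_neg_one_eq_nil (by omega : b ≤ (-1 : Int)), List.zip_nil_right]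
    simp; intro i h1 h2 h3; omega
  | succ m ih =>
    intro a b hb p
    by_cases h : a < n ∧ 0 ≤ b
    · rw [PySem.List.pyRange_one_cons (by omega : a < n),
        PySem.List.pyRange_neg_one_cons (by omega : (-1 : Int) < b), List.zip_cons_cons, List.mem_cons,
        ih (a + 1) (b - 1) (by omega) p]
      constructor
      · rintro (rfl | ⟨i, h1, h2, h3, rfl⟩)
        · exact ⟨a, by omega, by omega, by omega, by rw [show a + b - a = b by omega]⟩
        · exact ⟨i, by omega, by omega, by omega, by rw [show a + b - i = a + 1 + (b - 1) - i by omega]⟩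
      · rintro ⟨i, h1, h2, h3, rfl⟩
        by_cases hi : i = a
        · left; rw [hi, show a + b - a = b by omega]
        · right; exact ⟨i, by omega, by omega, by omega, by rw [show a + 1 + (b - 1) - i = a + b - i by omega]⟩
    · rcases (by omega : n ≤ a ∨ b < 0) with h' | h'
      · rw [PySem.List.pyRange_one_eq_nil (by omega : n ≤ a)]
        simp; intro i h1 h2; omega
      · rw [PySem.List.pyRange_neg_one_eq_nil (by omega : b ≤ (-1 : Int)), List.zip_nil_right]
        simp; intro i h1 h2 h3; omega

-- membership in the zip of two descending ranges
lemma mem_zip_dd : ∀ (m : Nat) (a b : Int), a < (m : Int) → ∀ p : Int × Int,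
    (p ∈ (PySem.List.pyRange a (-1) (-1)).zip (PySem.List.pyRange b (-1) (-1)) ↔
      ∃ i : Int, 0 ≤ i ∧ i ≤ a ∧ 0 ≤ b - a + i ∧ p = (i, b - a + i)) := by
  intro m
  induction m with
  | zero =>
    intro a b ha p
    rw [PySem.List.pyRange_neg_one_eq_nil (by omega : a ≤ (-1 : Int))]
    simp; intro i h1 h2; omega
  | succ m ih =>
    intro a b ha p
    by_cases h : 0 ≤ a ∧ 0 ≤ b
    · rw [PySem.List.pyRange_neg_one_cons (by omega : (-1 : Int) < a),
        PySem.List.pyRange_neg_one_cons (by omega : (-1 : Int) < b), List.zip_cons_cons, List.mem_cons,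
        ih (a - 1) (b - 1) (by omega) p]
      constructor
      · rintro (rfl | ⟨i, h1, h2, h3, rfl⟩)
        · exact ⟨a, by omega, by omega, by omega, by rw [show b - a + a = b by omega]⟩
        · exact ⟨i, by omega, by omega, by omega, by rw [show b - a + i = b - 1 - (a - 1) + i by omega]⟩
      · rintro ⟨i, h1, h2, h3, rfl⟩
        by_cases hi : i = a
        · left; rw [hi, show b - a + a = b by omega]
        · right; exact ⟨i, by omega, by omega, by omega, by rw [show b - 1 - (a - 1) + i = b - a + i by omega]⟩
    · rcases (by omega : a < 0 ∨ b < 0) with h' | h'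
      · rw [PySem.List.pyRange_neg_one_eq_nil (by omega : a ≤ (-1 : Int))]
        simp; intro i h1 h2; omega
      · rw [PySem.List.pyRange_neg_one_eq_nil (by omega : b ≤ (-1 : Int)), List.zip_nil_right]
        simp; intro i h1 h2 h3; omega

-- membership in the zip of two ascending ranges
lemma mem_zip_aa (n : Int) : ∀ (m : Nat) (a b : Int), n - a ≤ (m : Int) → ∀ p : Int × Int,
    (p ∈ (PySem.List.pyRange a n 1).zip (PySem.List.pyRange b n 1) ↔
      ∃ i : Int, a ≤ i ∧ i < n ∧ b - a + i < n ∧ p = (i, b - a + i)) := by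
  intro m
  induction m with
  | zero =>
    intro a b ha p
    rw [PySem.List.pyRange_one_eq_nil (by omega : n ≤ a)]
    simp; intro i h1 h2; omega
  | succ m ih =>
    intro a b ha p
    by_cases h : a < n ∧ b < n
    · rw [PySem.List.pyRange_one_cons (by omega : a < n),
        PySem.List.pyRange_one_cons (by omega : b < n), List.zip_cons_cons, List.mem_cons,
        ih (a + 1) (b + 1) (by omega) p]
      constructor
      · rintro (rfl | ⟨i, h1, h2, h3, rfl⟩)
        · exact ⟨a, by omega, by omega, by omega, by rw [show b - a + a = b by omega]⟩
        · exact ⟨i, by omega, by omega, by omega, by rw [show b - a + i = b + 1 - (a + 1) + i by omega]⟩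
      · rintro ⟨i, h1, h2, h3, rfl⟩
        by_cases hi : i = a
        · left; rw [hi, show b - a + a = b by omega]
        · right; exact ⟨i, by omega, by omega, by omega, by rw [show b + 1 - (a + 1) + i = b - a + i by omega]⟩
    · rcases (by omega : n ≤ a ∨ n ≤ b) with h' | h'
      · rw [PySem.List.pyRange_one_eq_nil (by omega : n ≤ a)]
        simp; intro i h1 h2; omega
      · rw [PySem.List.pyRange_one_eq_nil (by omega : n ≤ b), List.zip_nil_right]
        simp; intro i h1 h2 h3; omega

-- the length of a nodup list of direction strings is the sum of six membership indicators
lemma len_six (S : List String) (hn : S.Nodup)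
    (hsub : ∀ x ∈ S, x = "N" ∨ x = "S" ∨ x = "NE" ∨ x = "SW" ∨ x = "NW" ∨ x = "SE") :
    ((S.length : Int)) =
      (if "N" ∈ S then (1 : Int) else 0) + (if "S" ∈ S then 1 else 0) +
      (if "NE" ∈ S then 1 else 0) + (if "SW" ∈ S then 1 else 0) +
      (if "NW" ∈ S then 1 else 0) + (if "SE" ∈ S then 1 else 0) := by
  have hperm : S.Perm (List.filter (fun x => decide (x ∈ S)) ["N", "S", "NE", "SW", "NW", "SE"]) := by
    rw [List.perm_ext_iff_of_nodup hn (List.Nodup.filter _ (by decide))]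
    intro x
    simp only [List.mem_filter, decide_eq_true_eq]
    constructor
    · intro hx
      refine ⟨?_, hx⟩
      rcases hsub x hx with h | h | h | h | h | h <;> simp [h]
    · rintro ⟨-, hx⟩; exact hx
  rw [hperm.length_eq]
  simp only [List.filter_cons, List.filter_nil, decide_eq_true_eq]
  split_ifs <;> simp

-- the six direction equivalences for -1 ≤ row ≤ n: A's ray test succeeds iff B's row pass
-- has recorded the matching direction string (the index sets coincide; no validity is needed,
-- both ports read the very same cells through pvCell)
lemma iff_N (board : List (List Int)) (row col : Int)
    (hr1 : -1 ≤ row) (hr2 : row ≤ (board.length : Int)) :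
    ((PySem.List.pyRange (row - 1) (-1) (-1)).any (fun i => pvCell board i col == 1) = true) ↔
      (∃ i ∈ PySem.List.pyRange 0 (board.length : Int) 1, i ≠ row ∧
        pvEmits board row col (board.length : Int) i "N") := by
  rw [List.any_eq_true]
  constructor
  · rintro ⟨i, hi, hci⟩
    rw [PySem.List.mem_pyRange_neg_one] at hi
    rw [beq_iff_eq] at hci
    exact ⟨i, by rw [PySem.List.mem_pyRange_one]; omega, by omega,
      (emits_N board row col _ i).mpr ⟨by omega, hci⟩⟩
  · rintro ⟨i, hi, hne, he⟩
    rw [PySem.List.mem_pyRange_one] at hi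
    obtain ⟨hlt, hc⟩ := (emits_N board row col _ i).mp he
    exact ⟨i, by rw [PySem.List.mem_pyRange_neg_one]; omega, by simp [hc]⟩

lemma iff_S (board : List (List Int)) (row col : Int)
    (hr1 : -1 ≤ row) (hr2 : row ≤ (board.length : Int)) :
    ((PySem.List.pyRange (row + 1) (board.length : Int) 1).any (fun i => pvCell board i col == 1) = true) ↔
      (∃ i ∈ PySem.List.pyRange 0 (board.length : Int) 1, i ≠ row ∧
        pvEmits board row col (board.length : Int) i "S") := by
  rw [List.any_eq_true]
  constructor
  · rintro ⟨i, hi, hci⟩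
    rw [PySem.List.mem_pyRange_one] at hi
    rw [beq_iff_eq] at hci
    exact ⟨i, by rw [PySem.List.mem_pyRange_one]; omega, by omega,
      (emits_S board row col _ i).mpr ⟨by omega, hci⟩⟩
  · rintro ⟨i, hi, hne, he⟩
    rw [PySem.List.mem_pyRange_one] at hi
    obtain ⟨hge, hc⟩ := (emits_S board row col _ i).mp he
    exact ⟨i, by rw [PySem.List.mem_pyRange_one]; omega, by simp [hc]⟩

lemma iff_NE (board : List (List Int)) (row col : Int)
    (hr1 : -1 ≤ row) (hr2 : row ≤ (board.length : Int)) :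
    (((PySem.List.pyRange (row - 1) (-1) (-1)).zip (PySem.List.pyRange (col + 1) (board.length : Int) 1)).any
        (fun p => pvCell board p.1 p.2 == 1) = true) ↔
      (∃ i ∈ PySem.List.pyRange 0 (board.length : Int) 1, i ≠ row ∧
        pvEmits board row col (board.length : Int) i "NE") := by
  rw [List.any_eq_true]
  constructor
  · rintro ⟨p, hp, hgp⟩
    rw [mem_zip_da (board.length : Int) (row.toNat + 1) (row - 1) (col + 1) (by omega) p] at hp
    obtain ⟨i, hi0, hi1, hj, rfl⟩ := hp
    simp only [beq_iff_eq] at hgp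
    refine ⟨i, by rw [PySem.List.mem_pyRange_one]; omega, by omega,
      (emits_NE board row col _ i).mpr ⟨by omega, by omega, ?_⟩⟩
    rw [show col + (row - i) = col + 1 + (row - 1) - i from by ring]
    exact hgp
  · rintro ⟨i, hi, hne, he⟩
    rw [PySem.List.mem_pyRange_one] at hi
    obtain ⟨hlt, hjn, hc⟩ := (emits_NE board row col _ i).mp he
    refine ⟨(i, col + (row - i)), ?_, by simpa using hc⟩
    rw [mem_zip_da (board.length : Int) (row.toNat + 1) (row - 1) (col + 1) (by omega)]
    exact ⟨i, by omega, by omega, by omega, by rw [show col + 1 + (row - 1) - i = col + (row - i) from by ring]⟩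

lemma iff_SW (board : List (List Int)) (row col : Int)
    (hr1 : -1 ≤ row) (hr2 : row ≤ (board.length : Int)) :
    (((PySem.List.pyRange (row + 1) (board.length : Int) 1).zip (PySem.List.pyRange (col - 1) (-1) (-1))).any
        (fun p => pvCell board p.1 p.2 == 1) = true) ↔
      (∃ i ∈ PySem.List.pyRange 0 (board.length : Int) 1, i ≠ row ∧
        pvEmits board row col (board.length : Int) i "SW") := by
  rw [List.any_eq_true]
  constructor
  · rintro ⟨p, hp, hgp⟩
    rw [mem_zip_ad (board.length : Int) ((col - 1).toNat + 1) (row + 1) (col - 1) (by omega) p] at hp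
    obtain ⟨i, hi0, hi1, hj, rfl⟩ := hp
    simp only [beq_iff_eq] at hgp
    refine ⟨i, by rw [PySem.List.mem_pyRange_one]; omega, by omega,
      (emits_SW board row col _ i).mpr ⟨by omega, by omega, ?_⟩⟩
    rw [show col - (i - row) = row + 1 + (col - 1) - i from by ring]
    exact hgp
  · rintro ⟨i, hi, hne, he⟩
    rw [PySem.List.mem_pyRange_one] at hi
    obtain ⟨hge, hj0, hc⟩ := (emits_SW board row col _ i).mp he
    refine ⟨(i, col - (i - row)), ?_, by simpa using hc⟩
    rw [mem_zip_ad (board.length : Int) ((col - 1).toNat + 1) (row + 1) (col - 1) (by omega)]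
    exact ⟨i, by omega, by omega, by omega, by rw [show row + 1 + (col - 1) - i = col - (i - row) from by ring]⟩

lemma iff_NW (board : List (List Int)) (row col : Int)
    (hr1 : -1 ≤ row) (hr2 : row ≤ (board.length : Int)) :
    (((PySem.List.pyRange (row - 1) (-1) (-1)).zip (PySem.List.pyRange (col - 1) (-1) (-1))).any
        (fun p => pvCell board p.1 p.2 == 1) = true) ↔
      (∃ i ∈ PySem.List.pyRange 0 (board.length : Int) 1, i ≠ row ∧
        pvEmits board row col (board.length : Int) i "NW") := by
  rw [List.any_eq_true]
  constructor
  · rintro ⟨p, hp, hgp⟩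
    rw [mem_zip_dd (row.toNat + 1) (row - 1) (col - 1) (by omega) p] at hp
    obtain ⟨i, hi0, hi1, hj, rfl⟩ := hp
    simp only [beq_iff_eq] at hgp
    refine ⟨i, by rw [PySem.List.mem_pyRange_one]; omega, by omega,
      (emits_NW board row col _ i).mpr ⟨by omega, by omega, ?_⟩⟩
    rw [show col - (row - i) = col - 1 - (row - 1) + i from by ring]
    exact hgp
  · rintro ⟨i, hi, hne, he⟩
    rw [PySem.List.mem_pyRange_one] at hi
    obtain ⟨hlt, hj0, hc⟩ := (emits_NW board row col _ i).mp he
    refine ⟨(i, col - (row - i)), ?_, by simpa using hc⟩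
    rw [mem_zip_dd (row.toNat + 1) (row - 1) (col - 1) (by omega)]
    exact ⟨i, by omega, by omega, by omega, by rw [show col - 1 - (row - 1) + i = col - (row - i) from by ring]⟩

lemma iff_SE (board : List (List Int)) (row col : Int)
    (hr1 : -1 ≤ row) (hr2 : row ≤ (board.length : Int)) :
    (((PySem.List.pyRange (row + 1) (board.length : Int) 1).zip (PySem.List.pyRange (col + 1) (board.length : Int) 1)).any
        (fun p => pvCell board p.1 p.2 == 1) = true) ↔
      (∃ i ∈ PySem.List.pyRange 0 (board.length : Int) 1, i ≠ row ∧
        pvEmits board row col (board.length : Int) i "SE") := by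
  rw [List.any_eq_true]
  constructor
  · rintro ⟨p, hp, hgp⟩
    rw [mem_zip_aa (board.length : Int) board.length (row + 1) (col + 1) (by omega) p] at hp
    obtain ⟨i, hi0, hi1, hj, rfl⟩ := hp
    simp only [beq_iff_eq] at hgp
    refine ⟨i, by rw [PySem.List.mem_pyRange_one]; omega, by omega,
      (emits_SE board row col _ i).mpr ⟨by omega, by omega, ?_⟩⟩
    rw [show col + (i - row) = col + 1 - (row + 1) + i from by ring]
    exact hgp
  · rintro ⟨i, hi, hne, he⟩
    rw [PySem.List.mem_pyRange_one] at hi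
    obtain ⟨hge, hjn, hc⟩ := (emits_SE board row col _ i).mp he
    refine ⟨(i, col + (i - row)), ?_, by simpa using hc⟩
    rw [mem_zip_aa (board.length : Int) board.length (row + 1) (col + 1) (by omega)]
    exact ⟨i, by omega, by omega, by omega, by rw [show col + 1 - (row + 1) + i = col + (i - row) from by ring]⟩

-- the main case: -1 ≤ row ≤ n (the ports read the same cells; Pre_'s pvRowOk part only
-- guarantees that the Pythons read them without raising)
lemma case_main (board : List (List Int)) (row col : Int)
    (hr1 : -1 ≤ row) (hr2 : row ≤ (board.length : Int)) :
    threat_score board row col = threat_score_alt board row col := by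
  simp only [threat_score, threat_score_alt]
  have hnodup := nodup_seenB board row col
  have hsub : ∀ x ∈ (PySem.List.pyRange 0 (board.length : Int) 1).foldl
      (fun acc i => if i = row then acc
        else pvScanRow row col (board.length : Int) ((PySem.List.pyGet? board i).getD []) acc i)
      PySem.Set.empty,
      x = "N" ∨ x = "S" ∨ x = "NE" ∨ x = "SW" ∨ x = "NW" ∨ x = "SE" := by
    intro x hx
    rw [mem_seenB] at hx
    obtain ⟨i, -, -, he⟩ := hx
    exact emits_cases _ _ _ _ _ _ he
  rw [len_six _ hnodup hsub,
    if_congr ((iff_N board row col hr1 hr2).trans (mem_seenB board row col "N").symm) rfl rfl,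
    if_congr ((iff_S board row col hr1 hr2).trans (mem_seenB board row col "S").symm) rfl rfl,
    if_congr ((iff_NE board row col hr1 hr2).trans (mem_seenB board row col "NE").symm) rfl rfl,
    if_congr ((iff_SW board row col hr1 hr2).trans (mem_seenB board row col "SW").symm) rfl rfl,
    if_congr ((iff_NW board row col hr1 hr2).trans (mem_seenB board row col "NW").symm) rfl rfl,
    if_congr ((iff_SE board row col hr1 hr2).trans (mem_seenB board row col "SE").symm) rfl rfl]

-- queen-free inputs: every ray test fails and B's row pass records nothing
lemma case_queenfree (board : List (List Int)) (row col : Int)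
    (hq : ∀ r ∈ board, (1 : Int) ∉ r) :
    threat_score board row col = threat_score_alt board row col := by
  simp only [threat_score, threat_score_alt]
  have hne := pvCell_ne_one board hq
  have ha1 : ∀ (l : List Int), (l.any (fun i => pvCell board i col == 1)) = false := by
    intro l; rw [List.any_eq_false]; intro i _; simpa using hne i col
  have ha2 : ∀ (l : List (Int × Int)), (l.any (fun p => pvCell board p.1 p.2 == 1)) = false := by
    intro l; rw [List.any_eq_false]; intro p _; simpa using hne p.1 p.2
  have hseen : (PySem.List.pyRange 0 (board.length : Int) 1).foldl
      (fun acc i => if i = row then acc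
        else pvScanRow row col (board.length : Int) ((PySem.List.pyGet? board i).getD []) acc i)
      PySem.Set.empty = [] := by
    rw [List.eq_nil_iff_forall_not_mem]
    intro x hx
    rw [mem_seenB] at hx
    obtain ⟨i, -, -, he⟩ := hx
    unfold pvEmits at he
    rcases he with ⟨hc, -⟩ | ⟨-, hc, -⟩ | ⟨-, hc, -⟩ <;> exact hne _ _ hc
  rw [hseen, ha1, ha1, ha2, ha2, ha2, ha2]
  simp

-- ===== VERDICT (by name: the statement is the Claim_ definition above) =====
theorem threat_score_spec : Claim_equal_threat_score := by
  intro board row col _ hpre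
  unfold Spec_threat_score
  rcases hpre with ⟨hr1, hr2, -⟩ | ⟨hq, -, -, -, -⟩
  · exact case_main board row col hr1 hr2
  · exact case_queenfree board row col (fun r hr => (hq r hr).2)
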